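-- pv_equiv track=rewrite | github.com/dhirajtripathi/genai-api-migration | tabs_agentic/tab3_generate.py | parse_ai_response_to_files
-- ===== SOURCE A (Python) =====
-- def parse_ai_response_to_files(response):
--     """Parse the agent's response into a dictionary of file paths and contents."""
--     files_dict = {}
--     current_file = None
--     current_content = []
--
--     for line in response.splitlines():
--         if line.startswith("### "):
--             if current_file and current_content:
--                 files_dict[current_file] = "\n".join(current_content).strip()
--             current_file = line[4:].strip()
--             current_content = []
--         elif current_file:
--             current_content.append(line)
--
--     if current_file and current_content:
--         files_dict[current_file] = "\n".join(current_content).strip()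
--
--     return files_dict
-- ===== SOURCE B (Python) =====
-- def parse_ai_response_to_files(response):
--     """Parse the agent's response into a dictionary of file paths and contents."""
--
--     def split_block(ls):
--         # span: lines up to (exclusive) the next "### " header, and the rest
--         for k, x in enumerate(ls):
--             if x.startswith("### "):
--                 return ls[:k], ls[k:]
--         return ls, []
--
--     result = {}
--     lines = response.splitlines()
--     while lines:
--         head, lines = lines[0], lines[1:]
--         if head.startswith("### "):
--             name = head[4:].strip()
--             body, lines = split_block(lines)
--             if name and body:
--                 result[name] = "\n".join(body).strip()
--     return result
-- ===== Notes on version B (the rewrite author's own statement) =====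
-- stated objective: alternative
-- what changed: Replaces A's single stateful pass (current_file/current_content accumulator with duplicated flush logic) by a block decomposition: repeatedly find a header line and split off its body with a span helper, inserting each complete block at once.
import Mathlib
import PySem

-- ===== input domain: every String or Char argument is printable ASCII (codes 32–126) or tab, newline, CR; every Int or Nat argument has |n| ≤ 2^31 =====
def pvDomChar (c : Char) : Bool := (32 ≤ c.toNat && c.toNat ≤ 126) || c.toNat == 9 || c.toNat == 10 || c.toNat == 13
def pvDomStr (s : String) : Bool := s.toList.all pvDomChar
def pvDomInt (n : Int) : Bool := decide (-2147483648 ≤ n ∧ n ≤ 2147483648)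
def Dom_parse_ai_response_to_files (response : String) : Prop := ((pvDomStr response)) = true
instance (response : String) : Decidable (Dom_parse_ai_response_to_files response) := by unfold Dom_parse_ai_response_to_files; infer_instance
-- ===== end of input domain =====

-- B replaces A's single stateful accumulator pass by a block decomposition (find header, span off its body, insert at once); objective: alternative.

-- ===== PORT A =====
-- state: (files_dict, current_file, current_content)
def pvStepA (st : PySem.Dict String String × Option String × List String) (line : String) :
    PySem.Dict String String × Option String × List String :=
  match st with
  | (d, cf, cc) =>
    if PySem.Str.startswith line "### " then
      let d' :=
        match cf with
        | some f => if f ≠ "" ∧ cc ≠ [] then d.insert f (PySem.Str.strip (PySem.Str.join "\n" cc)) else d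
        | none => d
      (d', some (PySem.Str.strip (PySem.Str.slice line (some 4) none)), ([] : List String))
    else
      match cf with
      | some f => if f ≠ "" then (d, some f, cc ++ [line]) else (d, some f, cc)
      | none => (d, none, cc)

-- the trailing 'if current_file and current_content' flush
def pvFinishA (st : PySem.Dict String String × Option String × List String) : PySem.Dict String String :=
  match st with
  | (d, some f, cc) => if f ≠ "" ∧ cc ≠ [] then d.insert f (PySem.Str.strip (PySem.Str.join "\n" cc)) else d
  | (d, none, _) => d

def parse_ai_response_to_files (response : String) : List (String × String) :=
  (pvFinishA ((PySem.Str.splitlines response).foldl pvStepA (PySem.Dict.empty, none, []))).items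

-- ===== PORT B =====
-- "not a header line" predicate; split_block = span of this over the lines
def pvNotHeader (x : String) : Bool := !(PySem.Str.startswith x "### ")

def pvGoB (lines : List String) (d : PySem.Dict String String) : PySem.Dict String String :=
  match lines with
  | [] => d
  | head :: ls =>
    if PySem.Str.startswith head "### " then
      let name := PySem.Str.strip (PySem.Str.slice head (some 4) none)
      let body := ls.takeWhile pvNotHeader
      let rest := ls.dropWhile pvNotHeader
      pvGoB rest (if name ≠ "" ∧ body ≠ [] then d.insert name (PySem.Str.strip (PySem.Str.join "\n" body)) else d)
    else pvGoB ls d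
termination_by lines.length
decreasing_by
  · exact Nat.lt_succ_of_le (ls.dropWhile_sublist pvNotHeader).length_le
  · exact Nat.lt_succ_of_le (Nat.le_refl _)

def parse_ai_response_to_files_alt (response : String) : List (String × String) :=
  (pvGoB (PySem.Str.splitlines response) PySem.Dict.empty).items

-- ===== PRECONDITION & SPEC =====
def Spec_parse_ai_response_to_files (response : String) (out : List (String × String)) : Prop := out = parse_ai_response_to_files_alt response
instance (response : String) (out : List (String × String)) : Decidable (Spec_parse_ai_response_to_files response out) := by unfold Spec_parse_ai_response_to_files; infer_instance

-- ===== CLAIM (what is proved, stated in full; the proofs are below) =====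
def Claim_equal_parse_ai_response_to_files : Prop := ∀ (response : String), Dom_parse_ai_response_to_files response → Spec_parse_ai_response_to_files response (parse_ai_response_to_files response)

-- ===== LEMMAS AND PROOFS =====

-- head of a non-empty dropWhile fails the predicate
theorem pvDropWhile_head_false {α : Type} (p : α → Bool) (ls : List α) (h : α) (rest : List α)
    (hrest : ls.dropWhile p = h :: rest) : p h = false := by
  induction ls with
  | nil => simp at hrest
  | cons a as ih =>
    rw [List.dropWhile_cons] at hrest
    by_cases ha : p a = true
    · rw [if_pos ha] at hrest; exact ih hrest
    · rw [if_neg ha] at hrest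
      obtain ⟨h1, _⟩ := List.cons.inj hrest
      subst h1; simpa using ha

-- unfolding lemmas for pvGoB
theorem pvGoB_nil (d : PySem.Dict String String) : pvGoB [] d = d := by
  rw [pvGoB]

theorem pvGoB_cons_header (h : String) (ls : List String) (d : PySem.Dict String String)
    (hh : PySem.Str.startswith h "### " = true) :
    pvGoB (h :: ls) d =
      pvGoB (ls.dropWhile pvNotHeader)
        (if PySem.Str.strip (PySem.Str.slice h (some 4) none) ≠ "" ∧ ls.takeWhile pvNotHeader ≠ [] then
          d.insert (PySem.Str.strip (PySem.Str.slice h (some 4) none))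
            (PySem.Str.strip (PySem.Str.join "\n" (ls.takeWhile pvNotHeader)))
         else d) := by
  rw [pvGoB]
  show (if PySem.Str.startswith h "### " = true then _ else _) = _
  rw [if_pos hh]

theorem pvGoB_cons_nothead (h : String) (ls : List String) (d : PySem.Dict String String)
    (hh : PySem.Str.startswith h "### " = false) :
    pvGoB (h :: ls) d = pvGoB ls d := by
  rw [pvGoB]
  show (if PySem.Str.startswith h "### " = true then _ else _) = _
  rw [if_neg (by rw [hh]; exact Bool.false_ne_true)]

-- folding A's step over non-header lines with a non-empty current file just appends the lines
theorem pvFold_nohead_ne (ls : List String) (h : ∀ x ∈ ls, pvNotHeader x = true)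
    (d : PySem.Dict String String) (f : String) (hf : f ≠ "") (cc : List String) :
    ls.foldl pvStepA (d, some f, cc) = (d, some f, cc ++ ls) := by
  induction ls generalizing cc with
  | nil => simp
  | cons a as ih =>
    have ha : PySem.Str.startswith a "### " = false := by
      have := h a (List.mem_cons_self ..)
      unfold pvNotHeader at this
      rwa [Bool.not_eq_true'] at this
    rw [List.foldl_cons]
    show as.foldl pvStepA
      (if PySem.Str.startswith a "### " = true then _ else _) = _
    rw [if_neg (by rw [ha]; exact Bool.false_ne_true), if_pos hf,
      ih (fun x hx => h x (List.mem_cons_of_mem _ hx))]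
    simp

-- with an empty current file, A skips the lines entirely
theorem pvFold_nohead_empty (ls : List String) (h : ∀ x ∈ ls, pvNotHeader x = true)
    (d : PySem.Dict String String) (cc : List String) :
    ls.foldl pvStepA (d, some "", cc) = (d, some "", cc) := by
  induction ls with
  | nil => simp
  | cons a as ih =>
    have ha : PySem.Str.startswith a "### " = false := by
      have := h a (List.mem_cons_self ..)
      unfold pvNotHeader at this
      rwa [Bool.not_eq_true'] at this
    rw [List.foldl_cons]
    show as.foldl pvStepA
      (if PySem.Str.startswith a "### " = true then _ else _) = _
    rw [if_neg (by rw [ha]; exact Bool.false_ne_true), if_neg (by simp)]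
    exact ih (fun x hx => h x (List.mem_cons_of_mem _ hx))

-- main invariant: after a header has set current_file := f, the finished fold
-- equals B's block processing of the span of the remaining lines
theorem pvMain (ls : List String) (d : PySem.Dict String String) (f : String) :
    pvFinishA (ls.foldl pvStepA (d, some f, [])) =
      pvGoB (ls.dropWhile pvNotHeader)
        (if f ≠ "" ∧ ls.takeWhile pvNotHeader ≠ [] then
          d.insert f (PySem.Str.strip (PySem.Str.join "\n" (ls.takeWhile pvNotHeader)))
         else d) := by
  have htk : ∀ x ∈ ls.takeWhile pvNotHeader, pvNotHeader x = true :=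
    fun x hx => List.mem_takeWhile_imp hx
  have hfold : ls.foldl pvStepA (d, some f, []) =
      (ls.dropWhile pvNotHeader).foldl pvStepA
        ((ls.takeWhile pvNotHeader).foldl pvStepA (d, some f, [])) := by
    conv_lhs => rw [← ls.takeWhile_append_dropWhile (p := pvNotHeader)]
    rw [List.foldl_append]
  have hcc : (ls.takeWhile pvNotHeader).foldl pvStepA (d, some f, []) =
      (d, some f, if f = "" then [] else ls.takeWhile pvNotHeader) := by
    by_cases hf : f = ""
    · subst hf; rw [pvFold_nohead_empty _ htk, if_pos rfl]
    · rw [pvFold_nohead_ne _ htk _ _ hf, if_neg hf]; simp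
  have hd : (if f ≠ "" ∧ (if f = "" then [] else ls.takeWhile pvNotHeader) ≠ [] then
        d.insert f (PySem.Str.strip (PySem.Str.join "\n"
          (if f = "" then [] else ls.takeWhile pvNotHeader))) else d) =
      (if f ≠ "" ∧ ls.takeWhile pvNotHeader ≠ [] then
        d.insert f (PySem.Str.strip (PySem.Str.join "\n" (ls.takeWhile pvNotHeader)))
       else d) := by
    by_cases hf : f = ""
    · subst hf; simp
    · simp only [if_neg hf]
  cases hrest : ls.dropWhile pvNotHeader with
  | nil =>
    rw [hfold, hrest, hcc, List.foldl_nil, pvGoB_nil]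
    show (if f ≠ "" ∧ (if f = "" then [] else ls.takeWhile pvNotHeader) ≠ [] then _ else _) = _
    exact hd
  | cons h rest' =>
    have hh : PySem.Str.startswith h "### " = true := by
      have := pvDropWhile_head_false pvNotHeader ls h rest' hrest
      unfold pvNotHeader at this
      rwa [Bool.not_eq_false'] at this
    rw [hfold, hrest, hcc, List.foldl_cons]
    show pvFinishA (rest'.foldl pvStepA
        (if PySem.Str.startswith h "### " = true then _ else _)) = _
    rw [if_pos hh]
    show pvFinishA (rest'.foldl pvStepA
        ((if f ≠ "" ∧ (if f = "" then [] else ls.takeWhile pvNotHeader) ≠ [] then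
            d.insert f (PySem.Str.strip (PySem.Str.join "\n"
              (if f = "" then [] else ls.takeWhile pvNotHeader))) else d),
          some (PySem.Str.strip (PySem.Str.slice h (some 4) none)), [])) = _
    rw [hd, pvMain rest' _ _, pvGoB_cons_header h rest' _ hh]
termination_by ls.length
decreasing_by
  have hle := (ls.dropWhile_sublist pvNotHeader).length_le
  rw [hrest] at hle
  simpa using Nat.lt_of_lt_of_le (Nat.lt_succ_self _) hle

-- from the initial state (no current file) the whole pass equals B's loop
theorem pvPre (ls : List String) (d : PySem.Dict String String) :
    pvFinishA (ls.foldl pvStepA (d, none, [])) = pvGoB ls d := by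
  induction ls with
  | nil => rw [List.foldl_nil, pvGoB_nil]; rfl
  | cons a as ih =>
    rw [List.foldl_cons]
    by_cases ha : PySem.Str.startswith a "### " = true
    · show pvFinishA (as.foldl pvStepA
          (if PySem.Str.startswith a "### " = true then _ else _)) = _
      rw [if_pos ha, pvGoB_cons_header a as d ha]
      exact pvMain as d _
    · have ha' : PySem.Str.startswith a "### " = false := Bool.eq_false_iff.mpr ha
      show pvFinishA (as.foldl pvStepA
          (if PySem.Str.startswith a "### " = true then _ else _)) = _
      rw [if_neg ha, pvGoB_cons_nothead a as d ha']
      exact ih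

-- ===== VERDICT (by name: the statement is the Claim_ definition above) =====
theorem parse_ai_response_to_files_spec : Claim_equal_parse_ai_response_to_files := by
  intro response _
  unfold Spec_parse_ai_response_to_files parse_ai_response_to_files parse_ai_response_to_files_alt
  rw [pvPre]
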